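-- pv_equiv track=rewrite | github.com/mkaskov/text-editor | ner/ner.py | end_to_start_concat_entity
-- ===== SOURCE A (Python) =====
-- def end_to_start_concat_entity(entity_arr, startTag, middleTag, endTag):
--     retValue = []
--     lastIndex = -1
--     for i,item in enumerate(entity_arr):
--         if i+1<len(entity_arr):
--             if not lastIndex==i:
--                 curr = item[1]
--                 next = entity_arr[i+1][1]
--                 last_ = curr[-1]
--                 _last = next[-1]
--
--                 if last_ in [startTag,middleTag] and _last == endTag:
--                     text = item[0]+ " " + entity_arr[i+1][0]
--                     tag = curr + next
--                     retValue.append([text,tag])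
--                     lastIndex = i+1
--
--                 else: retValue.append(item)
--         else:
--             if not lastIndex == i:
--                 retValue.append(item)
--
--     return retValue
-- ===== SOURCE B (Python) =====
-- def end_to_start_concat_entity(entity_arr, startTag, middleTag, endTag):
--     # Recursive decomposition: merge the head pair if it qualifies and recurse on the
--     # remainder, otherwise keep the head and recurse on the tail.
--     if len(entity_arr) >= 2:
--         first, second = entity_arr[0], entity_arr[1]
--         if first[1][-1] in (startTag, middleTag) and second[1][-1] == endTag:
--             merged = [first[0] + " " + second[0], first[1] + second[1]]
--             return [merged] + end_to_start_concat_entity(entity_arr[2:], startTag, middleTag, endTag)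
--         return [first] + end_to_start_concat_entity(entity_arr[1:], startTag, middleTag, endTag)
--     return entity_arr[:]
-- ===== Notes on version B (the rewrite author's own statement) =====
-- stated objective: simpler
-- what changed: Replaces A's iterative enumerate loop with its lastIndex skip-sentinel and index arithmetic into the full list by a structural recursion on the list: merge the head pair and recurse on the rest, or keep the head and recurse on the tail, so no index or skip state exists at all.
import Mathlib
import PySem

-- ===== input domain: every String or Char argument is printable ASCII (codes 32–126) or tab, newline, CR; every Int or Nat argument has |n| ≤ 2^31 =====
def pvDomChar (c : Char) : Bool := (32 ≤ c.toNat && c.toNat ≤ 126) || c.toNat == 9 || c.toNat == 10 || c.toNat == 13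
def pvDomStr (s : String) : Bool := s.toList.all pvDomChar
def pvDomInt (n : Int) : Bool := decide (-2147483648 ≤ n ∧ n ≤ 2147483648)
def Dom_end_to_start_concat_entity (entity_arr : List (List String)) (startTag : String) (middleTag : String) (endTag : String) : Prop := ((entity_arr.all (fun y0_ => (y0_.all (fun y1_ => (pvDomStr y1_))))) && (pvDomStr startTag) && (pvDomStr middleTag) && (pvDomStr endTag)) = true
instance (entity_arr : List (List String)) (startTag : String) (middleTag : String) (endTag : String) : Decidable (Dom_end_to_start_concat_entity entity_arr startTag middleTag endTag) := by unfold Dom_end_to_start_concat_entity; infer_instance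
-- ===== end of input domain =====

-- B replaces A's enumerate loop with a lastIndex skip-sentinel by a structural recursion on the
-- list (merge head pair and recurse, or keep head and recurse): simpler decomposition, same
-- return value; A appends the original inner lists by reference, B returns fresh outer lists.


-- ===== PORT A =====
-- one iteration of A's for-loop; state = (retValue, lastIndex), p = (i, item) from enumerate
def pvStepA (full : List (List String)) (startTag middleTag endTag : String)
    (s : List (List String) × Int) (p : Int × List String) : List (List String) × Int :=
  let retValue := s.1
  let lastIndex := s.2
  let i := p.1
  let item := p.2
  if i + 1 < (full.length : Int) then
    if lastIndex ≠ i then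
      let curr := (PySem.List.pyGet? item 1).getD ""
      let nextItem := (PySem.List.pyGet? full (i + 1)).getD []
      let next := (PySem.List.pyGet? nextItem 1).getD ""
      let last_ := ((PySem.Str.pyGet? curr (-1)).map (fun c => String.ofList [c])).getD ""
      let _last := ((PySem.Str.pyGet? next (-1)).map (fun c => String.ofList [c])).getD ""
      if (last_ = startTag ∨ last_ = middleTag) ∧ _last = endTag then
        let text := (PySem.List.pyGet? item 0).getD "" ++ " " ++ (PySem.List.pyGet? nextItem 0).getD ""
        let tag := curr ++ next
        (retValue ++ [[text, tag]], i + 1)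
      else (retValue ++ [item], lastIndex)
    else (retValue, lastIndex)
  else
    if lastIndex ≠ i then (retValue ++ [item], lastIndex) else (retValue, lastIndex)

def end_to_start_concat_entity (entity_arr : List (List String)) (startTag : String) (middleTag : String) (endTag : String) : List (List String) :=
  ((PySem.List.enumerate entity_arr 0).foldl (pvStepA entity_arr startTag middleTag endTag) ([], -1)).1

-- ===== PORT B =====
-- B's structural recursion: merge the head pair if it qualifies and recurse on the remainder,
-- else keep the head and recurse on the tail; a list of fewer than two items is returned as is
def pvPairMerge (startTag middleTag endTag : String) : List (List String) → List (List String)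
  | [] => []
  | [x] => [x]
  | x :: y :: rest =>
    let ctag := (PySem.List.pyGet? x 1).getD ""
    let ntag := (PySem.List.pyGet? y 1).getD ""
    let clast := ((PySem.Str.pyGet? ctag (-1)).map (fun c => String.ofList [c])).getD ""
    let nlast := ((PySem.Str.pyGet? ntag (-1)).map (fun c => String.ofList [c])).getD ""
    if (clast = startTag ∨ clast = middleTag) ∧ nlast = endTag then
      [(PySem.List.pyGet? x 0).getD "" ++ " " ++ (PySem.List.pyGet? y 0).getD "", ctag ++ ntag]
        :: pvPairMerge startTag middleTag endTag rest
    else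
      x :: pvPairMerge startTag middleTag endTag (y :: rest)

def end_to_start_concat_entity_alt (entity_arr : List (List String)) (startTag : String) (middleTag : String) (endTag : String) : List (List String) :=
  pvPairMerge startTag middleTag endTag entity_arr

-- ===== PRECONDITION & SPEC =====
def pvWfItem (e : List String) : Bool :=
  match e with
  | _ :: t :: _ => t ≠ ""
  | _ => false

-- Pre_ excludes inputs where Python A raises an IndexError (an item with fewer than two fields,
-- or an empty tag string, in a list of length ≥ 2). It is slightly narrower than A's exact
-- returning domain: a malformed LAST item that A never inspects because the preceding pair merged
-- is also excluded, although A returns there (and B returns the same value there).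
def Pre_end_to_start_concat_entity (entity_arr : List (List String)) (startTag : String) (middleTag : String) (endTag : String) : Prop :=
  entity_arr.length ≤ 1 ∨ entity_arr.all pvWfItem = true
instance (entity_arr : List (List String)) (startTag : String) (middleTag : String) (endTag : String) : Decidable (Pre_end_to_start_concat_entity entity_arr startTag middleTag endTag) := by unfold Pre_end_to_start_concat_entity; infer_instance

def pvWitness_end_to_start_concat_entity : List (List String) × String × String × String :=
  ([["a", "S"], ["b", "E"], ["c", "X"]], "S", "M", "E")

def Spec_end_to_start_concat_entity (entity_arr : List (List String)) (startTag : String) (middleTag : String) (endTag : String) (out : List (List String)) : Prop := out = end_to_start_concat_entity_alt entity_arr startTag middleTag endTag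
instance (entity_arr : List (List String)) (startTag : String) (middleTag : String) (endTag : String) (out : List (List String)) : Decidable (Spec_end_to_start_concat_entity entity_arr startTag middleTag endTag out) := by unfold Spec_end_to_start_concat_entity; infer_instance

-- ===== CLAIM (what is proved, stated in full; the proofs are below) =====
def Claim_equal_end_to_start_concat_entity : Prop := ∀ (entity_arr : List (List String)) (startTag : String) (middleTag : String) (endTag : String), Dom_end_to_start_concat_entity entity_arr startTag middleTag endTag → Pre_end_to_start_concat_entity entity_arr startTag middleTag endTag → Spec_end_to_start_concat_entity entity_arr startTag middleTag endTag (end_to_start_concat_entity entity_arr startTag middleTag endTag)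

-- ===== LEMMAS AND PROOFS =====

-- an iteration whose index equals lastIndex changes nothing (A's skip)
lemma pvStepA_skip (full : List (List String)) (t1 t2 t3 : String)
    (acc : List (List String)) (j : Int) (y : List String) :
    pvStepA full t1 t2 t3 (acc, j) (j, y) = (acc, j) := by
  simp [pvStepA]

lemma pvDrop_get (full : List (List String)) (i : Nat) (x y : List String)
    (rest : List (List String)) (h : full.drop i = x :: y :: rest) :
    PySem.List.pyGet? full ((i : Int) + 1) = some y := by
  have : ((i : Int) + 1) = ((i + 1 : Nat) : Int) := by push_cast; ring
  rw [this, PySem.List.pyGet?_natCast]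
  have h1 : full[i + 1]? = (full.drop i)[1]? := by
    rw [List.getElem?_drop]
  rw [h1, h]
  rfl

-- the main loop invariant: folding A's step over the enumerated suffix starting at index i,
-- with lastIndex strictly below i, appends exactly B's pairwise merge of that suffix
lemma pvFoldA_eq (t1 t2 t3 : String) (full : List (List String)) :
    ∀ (l : List (List String)) (i : Nat) (acc : List (List String)) (last : Int),
      full.drop i = l → last < (i : Int) →
      ((PySem.List.enumerate l (i : Int)).foldl (pvStepA full t1 t2 t3) (acc, last)).1
        = acc ++ pvPairMerge t1 t2 t3 l := by
  intro l
  induction l using pvPairMerge.induct t1 t2 t3 with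
  | case1 =>
    intro i acc last _ _
    simp [PySem.List.enumerate_nil, pvPairMerge]
  | case2 x =>
    intro i acc last hd hlt
    have hlen : full.length = i + 1 := by
      have := congrArg List.length hd
      simp [List.length_drop] at this
      omega
    simp only [PySem.List.enumerate_cons, PySem.List.enumerate_nil, List.foldl_cons,
      List.foldl_nil, pvStepA]
    have h1 : ¬ ((i : Int) + 1 < (full.length : Int)) := by rw [hlen]; push_cast; omega
    have hne : last ≠ (i : Int) := by omega
    simp [h1, hne, pvPairMerge]
  | case3 x y rest _ctag _ntag _clast _nlast hcond ih =>
    intro i acc last hd hlt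
    have hlen : full.length = i + 2 + rest.length := by
      have := congrArg List.length hd
      simp [List.length_drop] at this
      omega
    have hy : PySem.List.pyGet? full ((i : Int) + 1) = some y := pvDrop_get full i x y rest hd
    have hd2 : full.drop (i + 2) = rest := by
      have h12 : full.drop (i + 2) = (full.drop i).drop 2 := by rw [List.drop_drop]
      rw [h12, hd]; rfl
    rw [PySem.List.enumerate_cons, List.foldl_cons]
    have hstep1 : pvStepA full t1 t2 t3 (acc, last) ((i : Int), x)
        = (acc ++ [[(PySem.List.pyGet? x 0).getD "" ++ " " ++ (PySem.List.pyGet? y 0).getD "",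
            (PySem.List.pyGet? x 1).getD "" ++ (PySem.List.pyGet? y 1).getD ""]], (i : Int) + 1) := by
      have hi1 : ((i : Int) + 1 < (full.length : Int)) := by rw [hlen]; push_cast; omega
      have hne : last ≠ (i : Int) := by omega
      simp only [pvStepA, hy, Option.getD_some, if_pos hi1, if_pos hne]
      split_ifs with h
      · rfl
      · exact absurd hcond h
    rw [hstep1, PySem.List.enumerate_cons, List.foldl_cons]
    have hcast1 : ((i : Int) + 1) = (((i + 1 : Nat)) : Int) := by push_cast; ring
    rw [hcast1, pvStepA_skip]
    have hcast2 : (((i + 1 : Nat) : Int) + 1) = (((i + 2 : Nat)) : Int) := by push_cast; ring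
    rw [hcast2, ih (i + 2) _ _ hd2 (by push_cast; omega)]
    simp only [pvPairMerge]
    split_ifs with h
    · simp
    · exact absurd hcond h
  | case4 x y rest _ctag _ntag _clast _nlast hcond ih =>
    intro i acc last hd hlt
    have hlen : full.length = i + 2 + rest.length := by
      have := congrArg List.length hd
      simp [List.length_drop] at this
      omega
    have hy : PySem.List.pyGet? full ((i : Int) + 1) = some y := pvDrop_get full i x y rest hd
    have hd1 : full.drop (i + 1) = y :: rest := by
      have h11 : full.drop (i + 1) = (full.drop i).drop 1 := by rw [List.drop_drop]
      rw [h11, hd]; rfl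
    rw [PySem.List.enumerate_cons, List.foldl_cons]
    have hstep1 : pvStepA full t1 t2 t3 (acc, last) ((i : Int), x) = (acc ++ [x], last) := by
      have hi1 : ((i : Int) + 1 < (full.length : Int)) := by rw [hlen]; push_cast; omega
      have hne : last ≠ (i : Int) := by omega
      simp only [pvStepA, hy, Option.getD_some, if_pos hi1, if_pos hne]
      split_ifs with h
      · exact absurd h hcond
      · rfl
    rw [hstep1]
    have hcast1 : ((i : Int) + 1) = (((i + 1 : Nat)) : Int) := by push_cast; ring
    rw [hcast1, ih (i + 1) _ _ hd1 (by push_cast; omega)]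
    simp only [pvPairMerge]
    split_ifs with h
    · exact absurd h hcond
    · simp

-- ===== VERDICT (by name: the statement is the Claim_ definition above) =====
theorem end_to_start_concat_entity_spec : Claim_equal_end_to_start_concat_entity := by
  intro entity_arr startTag middleTag endTag _ _
  unfold Spec_end_to_start_concat_entity end_to_start_concat_entity end_to_start_concat_entity_alt
  have := pvFoldA_eq startTag middleTag endTag entity_arr entity_arr 0 [] (-1) rfl (by omega)
  simpa using this
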